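/- GENERATED by farm/mkstatement.py from design/units.tsv (unit `vorbis_decode_initial.8`) and the assertions of Vorbis/Spec/DecodeInitial.lean — do not edit.
   THE STATEMENT of the proof unit `vorbis_decode_initial.8`: segment 8 of `vorbis_decode_initial` (34 instructions; entries 0x113337;
   exits 0x1133c3; ranges 0x113337-0x1133bc)
   takes each of its entry assertions to one of its exit assertions (`Vorbis.Spec.vorbis_decode_initial.Seg8`), given the contracts of its callees.
   What the names mean: Vorbis/Spec/Basic.lean (the shared hypotheses), Vorbis/Spec/DecodeInitial.lean (the assertions). The theorem to prove:
   `theorem vorbis_decode_initial_8_ok : Vorbis.Spec.vorbis_decode_initial_8.Statement`. -/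
import Vorbis.Spec.DecodeInitial
namespace Vorbis.Spec.vorbis_decode_initial_8
open X86 X86.User Asan

/-- The statement of unit `vorbis_decode_initial.8`. -/
def Statement : Prop :=
  ∀ (Lay : Layout) (_hLay : Lay.hi = 0x1000000) (μ : Microarch) (_hμ : UserX.MicroOK μ) (u₀ : State)
    (_hcode : HasCodeNat Lay u₀ Vorbis.L.vorbis_decode_initial.entry Vorbis.Code.code_vorbis_decode_initial.nat Vorbis.L.vorbis_decode_initial.size)
    (_h_asan_store4_noabort : Asan.SmallCheck Lay μ Vorbis.WayInv (Vorbis.CodeOK u₀) [.rax, .rcx, .rdx] 4 Vorbis.L.__asan_store4_noabort.entry)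
    (_h_asan_load4_noabort : Asan.SmallCheck Lay μ Vorbis.WayInv (Vorbis.CodeOK u₀) [.rax, .rcx, .rdx] 4 Vorbis.L.__asan_load4_noabort.entry),
    Vorbis.Spec.vorbis_decode_initial.Seg8 Lay μ u₀

end Vorbis.Spec.vorbis_decode_initial_8
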